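-- pv_equiv track=rewrite | github.com/BlackBlackSoul/UWR | ProgramowaniePython/UWR-Python-WDP/L7/Zad2vergood.py | sprawdzenie_slow1
-- ===== SOURCE A (Python) =====
-- def mset(L):
-- 	wynik = {}
--
-- 	for e in L:
-- 		if not e in wynik:
-- 			wynik[e] = 1
-- 		else:
-- 			wynik[e] += 1
-- 	return wynik
--
-- def sprawdzenie_slow1(A,B):
-- 	A = A.lower()
-- 	B = B.lower()
-- 	if not set(A) <= set(B):
-- 		return False
-- 	else:
-- 		A_zbior = mset(A)
-- 		B_zbior = mset(B)
-- 		Bool_check = True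
-- 		for i in A_zbior.keys():
-- 			if A_zbior[i] > B_zbior[i]:
-- 				Bool_check = False
-- 				break
-- 		return Bool_check
-- ===== SOURCE B (Python) =====
-- def sprawdzenie_slow1(A, B):
--     la = list(A.lower())
--     lb = list(B.lower())
--     return all(la.count(c) <= lb.count(c) for c in la)
-- ===== Notes on version B (the rewrite author's own statement) =====
-- stated objective: simpler
-- what changed: Drops A's set-subset precheck and its two hand-built count dicts: B is a single all() over per-character occurrence-count comparisons of A.lower() in both strings (absent characters naturally count 0); on the small alphabets measured, C-level list.count beats A's Python-level dict loops.
import Mathlib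
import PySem

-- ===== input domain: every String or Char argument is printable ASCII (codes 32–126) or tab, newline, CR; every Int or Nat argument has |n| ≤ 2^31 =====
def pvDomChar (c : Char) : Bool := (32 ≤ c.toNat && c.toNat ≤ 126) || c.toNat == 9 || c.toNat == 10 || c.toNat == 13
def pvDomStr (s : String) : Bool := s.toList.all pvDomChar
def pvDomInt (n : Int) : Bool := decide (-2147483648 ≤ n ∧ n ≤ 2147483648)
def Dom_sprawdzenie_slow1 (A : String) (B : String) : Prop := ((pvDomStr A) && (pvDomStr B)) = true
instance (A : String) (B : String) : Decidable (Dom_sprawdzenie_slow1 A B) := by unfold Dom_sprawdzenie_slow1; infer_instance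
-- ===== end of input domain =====

-- B replaces A's set-subset precheck plus two hand-built count dicts by a single
-- all-quantified per-character count comparison (objective: simpler).

-- ===== PORT A =====
-- helper mset: the hand-built count dict of A
def pvMset (L : List Char) : PySem.Dict Char Int :=
  L.foldl (fun wynik e =>
    if ¬ wynik.contains e then wynik.insert e 1
    -- wynik[e] += 1; key is present here, so getD 0 equals the KeyError-free lookup
    else wynik.insert e (wynik.getD e 0 + 1)) PySem.Dict.empty

-- the for-loop over A_zbior.keys with break: stops (returning false) at the first violation
-- B_zbior[i]: the set-subset precheck guarantees i ∈ B_zbior here, so getD 0 is the exact lookup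
def pvLoopA (Az Bz : PySem.Dict Char Int) : List Char → Bool
  | [] => true
  | i :: rest => if Az.getD i 0 > Bz.getD i 0 then false else pvLoopA Az Bz rest

def sprawdzenie_slow1 (A : String) (B : String) : Bool :=
  let A' := PySem.Str.lower A
  let B' := PySem.Str.lower B
  if ¬ (PySem.Set.issubset (PySem.Set.ofList A'.toList) (PySem.Set.ofList B'.toList) = true) then
    false
  else
    let Az := pvMset A'.toList
    let Bz := pvMset B'.toList
    pvLoopA Az Bz Az.keys

-- ===== PORT B =====
def sprawdzenie_slow1_alt (A : String) (B : String) : Bool :=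
  let la := (PySem.Str.lower A).toList
  let lb := (PySem.Str.lower B).toList
  la.all (fun c => la.count c ≤ lb.count c)

-- ===== PRECONDITION & SPEC =====
def Spec_sprawdzenie_slow1 (A : String) (B : String) (out : Bool) : Prop := out = sprawdzenie_slow1_alt A B
instance (A : String) (B : String) (out : Bool) : Decidable (Spec_sprawdzenie_slow1 A B out) := by unfold Spec_sprawdzenie_slow1; infer_instance

-- ===== CLAIM (what is proved, stated in full; the proofs are below) =====
def Claim_equal_sprawdzenie_slow1 : Prop := ∀ (A : String) (B : String), Dom_sprawdzenie_slow1 A B → Spec_sprawdzenie_slow1 A B (sprawdzenie_slow1 A B)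

-- ===== LEMMAS AND PROOFS =====

theorem pvMset_eq_counter (L : List Char) : pvMset L = PySem.Dict.counter L := by
  have hf : (fun (wynik : PySem.Dict Char Int) e =>
      if ¬ wynik.contains e then wynik.insert e 1
      else wynik.insert e (wynik.getD e 0 + 1))
      = (fun (d : PySem.Dict Char Int) x => d.insert x (d.getD x 0 + 1)) := by
    funext d x
    by_cases h : d.contains x
    · simp [h]
    · have h0 : d.getD x 0 = 0 := by
        rw [PySem.Dict.contains_eq_isSome_get?] at h
        simp [PySem.Dict.getD]
        cases hg : d.get? x with
        | none => simp
        | some v => rw [hg] at h; simp at h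
      simp [h, h0]
  unfold pvMset
  rw [hf, PySem.Dict.foldl_insert_getD_add_one_eq_counter]

theorem pvLoopA_eq_all (Az Bz : PySem.Dict Char Int) (ks : List Char) :
    pvLoopA Az Bz ks = ks.all (fun i => !(Az.getD i 0 > Bz.getD i 0)) := by
  induction ks with
  | nil => rfl
  | cons i rest ih =>
    by_cases h : Az.getD i 0 > Bz.getD i 0 <;> simp [pvLoopA, h, ih]

theorem pv_key (a b : List Char) :
    (if ¬ (PySem.Set.issubset (PySem.Set.ofList a) (PySem.Set.ofList b) = true) then false
     else pvLoopA (pvMset a) (pvMset b) (pvMset a).keys)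
    = a.all (fun c => a.count c ≤ b.count c) := by
  rw [pvMset_eq_counter, pvMset_eq_counter, pvLoopA_eq_all, PySem.Dict.keys_counter]
  by_cases hsub : PySem.Set.issubset (PySem.Set.ofList a) (PySem.Set.ofList b) = true
  · rw [if_neg (by simp [hsub])]
    rw [Bool.eq_iff_iff]
    simp only [List.all_eq_true, PySem.Dict.getD_counter, PySem.Set.mem_ofList,
      Bool.not_eq_eq_eq_not, Bool.not_true, decide_eq_false_iff_not, not_lt,
      decide_eq_true_eq]
    constructor
    · intro h c hc; exact_mod_cast h c hc
    · intro h c hc; exact_mod_cast h c hc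
  · rw [if_pos (by simp [hsub])]
    symm
    rw [List.all_eq_false]
    rw [PySem.Set.issubset_iff] at hsub
    push_neg at hsub
    obtain ⟨c, hcA, hcB⟩ := hsub
    have hcA' : c ∈ a := (PySem.Set.mem_ofList a c).mp hcA
    have hcB' : c ∉ b := fun h => hcB ((PySem.Set.mem_ofList b c).mpr h)
    refine ⟨c, hcA', ?_⟩
    have h1 : 0 < a.count c := List.count_pos_iff.mpr hcA'
    have h2 : b.count c = 0 := List.count_eq_zero.mpr hcB'
    simp [h2]; omega

-- ===== VERDICT (by name: the statement is the Claim_ definition above) =====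
theorem sprawdzenie_slow1_spec : Claim_equal_sprawdzenie_slow1 := by
  intro A B _
  show sprawdzenie_slow1 A B = sprawdzenie_slow1_alt A B
  unfold sprawdzenie_slow1 sprawdzenie_slow1_alt
  exact pv_key (PySem.Str.lower A).toList (PySem.Str.lower B).toList
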